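-- pv_equiv track=rewrite | github.com/rreusch2/parleyapp | scripts/nfl-headshot-collection-system.py | nfl_teams_match
-- ===== SOURCE A (Python) =====
-- def nfl_teams_match(team1: str, team2: str) -> bool:
--     """Check if two NFL team names/abbreviations match"""
--     if not team1 or not team2:
--         return False
--
--     team1 = team1.upper().strip()
--     team2 = team2.upper().strip()
--
--     # Exact match
--     if team1 == team2:
--         return True
--
--     # NFL team abbreviation mappings
--     nfl_team_mappings = {
--         'ARI': ['ARIZONA', 'ARIZONA CARDINALS'],
--         'ATL': ['ATLANTA', 'ATLANTA FALCONS'],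
--         'BAL': ['BALTIMORE', 'BALTIMORE RAVENS'],
--         'BUF': ['BUFFALO', 'BUFFALO BILLS'],
--         'CAR': ['CAROLINA', 'CAROLINA PANTHERS'],
--         'CHI': ['CHICAGO', 'CHICAGO BEARS'],
--         'CIN': ['CINCINNATI', 'CINCINNATI BENGALS'],
--         'CLE': ['CLEVELAND', 'CLEVELAND BROWNS'],
--         'DAL': ['DALLAS', 'DALLAS COWBOYS'],
--         'DEN': ['DENVER', 'DENVER BRONCOS'],
--         'DET': ['DETROIT', 'DETROIT LIONS'],
--         'GB': ['GREEN BAY', 'GREEN BAY PACKERS', 'GBP'],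
--         'HOU': ['HOUSTON', 'HOUSTON TEXANS'],
--         'IND': ['INDIANAPOLIS', 'INDIANAPOLIS COLTS'],
--         'JAX': ['JACKSONVILLE', 'JACKSONVILLE JAGUARS', 'JAC'],
--         'KC': ['KANSAS CITY', 'KANSAS CITY CHIEFS', 'KAN'],
--         'LV': ['LAS VEGAS', 'LAS VEGAS RAIDERS', 'LVR', 'RAI'],
--         'LAC': ['LOS ANGELES CHARGERS', 'LAC', 'SD', 'SAN DIEGO'],
--         'LAR': ['LOS ANGELES RAMS', 'LA', 'STL', 'ST. LOUIS'],
--         'MIA': ['MIAMI', 'MIAMI DOLPHINS'],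
--         'MIN': ['MINNESOTA', 'MINNESOTA VIKINGS'],
--         'NE': ['NEW ENGLAND', 'NEW ENGLAND PATRIOTS', 'NEP'],
--         'NO': ['NEW ORLEANS', 'NEW ORLEANS SAINTS', 'NOR'],
--         'NYG': ['NEW YORK GIANTS', 'NYG', 'NY GIANTS'],
--         'NYJ': ['NEW YORK JETS', 'NY JETS'],
--         'PHI': ['PHILADELPHIA', 'PHILADELPHIA EAGLES'],
--         'PIT': ['PITTSBURGH', 'PITTSBURGH STEELERS'],
--         'SF': ['SAN FRANCISCO', 'SAN FRANCISCO 49ERS', 'SFO'],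
--         'SEA': ['SEATTLE', 'SEATTLE SEAHAWKS'],
--         'TB': ['TAMPA BAY', 'TAMPA BAY BUCCANEERS', 'TAM'],
--         'TEN': ['TENNESSEE', 'TENNESSEE TITANS'],
--         'WAS': ['WASHINGTON', 'WASHINGTON COMMANDERS', 'WSH']
--     }
--
--     # Check mappings
--     for standard, alternatives in nfl_team_mappings.items():
--         if (team1 == standard and team2 in alternatives) or \
--            (team2 == standard and team1 in alternatives) or \
--            (team1 in alternatives and team2 in alternatives):
--             return True
--
--     return False
-- ===== SOURCE B (Python) =====
-- # B: replaces A's per-call scan over 32 alias groups by a single flat lookup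
-- # table alias -> canonical abbreviation; the match is two lookups and a compare.
-- CANON = {
--     'ARI': 'ARI',
--     'ARIZONA': 'ARI',
--     'ARIZONA CARDINALS': 'ARI',
--     'ATL': 'ATL',
--     'ATLANTA': 'ATL',
--     'ATLANTA FALCONS': 'ATL',
--     'BAL': 'BAL',
--     'BALTIMORE': 'BAL',
--     'BALTIMORE RAVENS': 'BAL',
--     'BUF': 'BUF',
--     'BUFFALO': 'BUF',
--     'BUFFALO BILLS': 'BUF',
--     'CAR': 'CAR',
--     'CAROLINA': 'CAR',
--     'CAROLINA PANTHERS': 'CAR',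
--     'CHI': 'CHI',
--     'CHICAGO': 'CHI',
--     'CHICAGO BEARS': 'CHI',
--     'CIN': 'CIN',
--     'CINCINNATI': 'CIN',
--     'CINCINNATI BENGALS': 'CIN',
--     'CLE': 'CLE',
--     'CLEVELAND': 'CLE',
--     'CLEVELAND BROWNS': 'CLE',
--     'DAL': 'DAL',
--     'DALLAS': 'DAL',
--     'DALLAS COWBOYS': 'DAL',
--     'DEN': 'DEN',
--     'DENVER': 'DEN',
--     'DENVER BRONCOS': 'DEN',
--     'DET': 'DET',
--     'DETROIT': 'DET',
--     'DETROIT LIONS': 'DET',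
--     'GB': 'GB',
--     'GREEN BAY': 'GB',
--     'GREEN BAY PACKERS': 'GB',
--     'GBP': 'GB',
--     'HOU': 'HOU',
--     'HOUSTON': 'HOU',
--     'HOUSTON TEXANS': 'HOU',
--     'IND': 'IND',
--     'INDIANAPOLIS': 'IND',
--     'INDIANAPOLIS COLTS': 'IND',
--     'JAX': 'JAX',
--     'JACKSONVILLE': 'JAX',
--     'JACKSONVILLE JAGUARS': 'JAX',
--     'JAC': 'JAX',
--     'KC': 'KC',
--     'KANSAS CITY': 'KC',
--     'KANSAS CITY CHIEFS': 'KC',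
--     'KAN': 'KC',
--     'LV': 'LV',
--     'LAS VEGAS': 'LV',
--     'LAS VEGAS RAIDERS': 'LV',
--     'LVR': 'LV',
--     'RAI': 'LV',
--     'LAC': 'LAC',
--     'LOS ANGELES CHARGERS': 'LAC',
--     'SD': 'LAC',
--     'SAN DIEGO': 'LAC',
--     'LAR': 'LAR',
--     'LOS ANGELES RAMS': 'LAR',
--     'LA': 'LAR',
--     'STL': 'LAR',
--     'ST. LOUIS': 'LAR',
--     'MIA': 'MIA',
--     'MIAMI': 'MIA',
--     'MIAMI DOLPHINS': 'MIA',
--     'MIN': 'MIN',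
--     'MINNESOTA': 'MIN',
--     'MINNESOTA VIKINGS': 'MIN',
--     'NE': 'NE',
--     'NEW ENGLAND': 'NE',
--     'NEW ENGLAND PATRIOTS': 'NE',
--     'NEP': 'NE',
--     'NO': 'NO',
--     'NEW ORLEANS': 'NO',
--     'NEW ORLEANS SAINTS': 'NO',
--     'NOR': 'NO',
--     'NYG': 'NYG',
--     'NEW YORK GIANTS': 'NYG',
--     'NY GIANTS': 'NYG',
--     'NYJ': 'NYJ',
--     'NEW YORK JETS': 'NYJ',
--     'NY JETS': 'NYJ',
--     'PHI': 'PHI',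
--     'PHILADELPHIA': 'PHI',
--     'PHILADELPHIA EAGLES': 'PHI',
--     'PIT': 'PIT',
--     'PITTSBURGH': 'PIT',
--     'PITTSBURGH STEELERS': 'PIT',
--     'SF': 'SF',
--     'SAN FRANCISCO': 'SF',
--     'SAN FRANCISCO 49ERS': 'SF',
--     'SFO': 'SF',
--     'SEA': 'SEA',
--     'SEATTLE': 'SEA',
--     'SEATTLE SEAHAWKS': 'SEA',
--     'TB': 'TB',
--     'TAMPA BAY': 'TB',
--     'TAMPA BAY BUCCANEERS': 'TB',
--     'TAM': 'TB',
--     'TEN': 'TEN',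
--     'TENNESSEE': 'TEN',
--     'TENNESSEE TITANS': 'TEN',
--     'WAS': 'WAS',
--     'WASHINGTON': 'WAS',
--     'WASHINGTON COMMANDERS': 'WAS',
--     'WSH': 'WAS',
-- }
--
--
-- def nfl_teams_match(team1: str, team2: str) -> bool:
--     """Check if two NFL team names/abbreviations match"""
--     if not team1 or not team2:
--         return False
--
--     t1 = team1.upper().strip()
--     t2 = team2.upper().strip()
--
--     if t1 == t2:
--         return True
--
--     c1 = CANON.get(t1)
--     c2 = CANON.get(t2)
--     return c1 is not None and c1 == c2
-- ===== Notes on version B (the rewrite author's own statement) =====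
-- stated objective: simpler
-- what changed: Replaced the per-call scan over all 32 alias groups (three membership tests per group) by a single flat literal dict mapping every standard and alternative name to its canonical abbreviation; the match is two dict lookups and an equality test.
import Mathlib
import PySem

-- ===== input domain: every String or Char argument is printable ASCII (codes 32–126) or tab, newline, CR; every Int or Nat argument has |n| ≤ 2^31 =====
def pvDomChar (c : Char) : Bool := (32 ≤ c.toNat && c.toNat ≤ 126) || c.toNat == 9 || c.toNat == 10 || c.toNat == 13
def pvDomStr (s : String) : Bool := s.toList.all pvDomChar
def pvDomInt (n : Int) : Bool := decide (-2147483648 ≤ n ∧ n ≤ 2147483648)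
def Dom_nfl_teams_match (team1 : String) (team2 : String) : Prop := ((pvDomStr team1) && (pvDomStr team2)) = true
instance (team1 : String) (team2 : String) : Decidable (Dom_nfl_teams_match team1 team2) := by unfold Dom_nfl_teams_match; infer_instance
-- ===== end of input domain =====

-- B replaces A's per-call scan over all 32 alias groups by a single flat literal
-- dict (alias ↦ canonical abbreviation); the match is two lookups and a comparison (objective: simpler).

-- ===== PORT A =====
def nflTable : List (String × List String) := [
  ("ARI", ["ARIZONA", "ARIZONA CARDINALS"]),
  ("ATL", ["ATLANTA", "ATLANTA FALCONS"]),
  ("BAL", ["BALTIMORE", "BALTIMORE RAVENS"]),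
  ("BUF", ["BUFFALO", "BUFFALO BILLS"]),
  ("CAR", ["CAROLINA", "CAROLINA PANTHERS"]),
  ("CHI", ["CHICAGO", "CHICAGO BEARS"]),
  ("CIN", ["CINCINNATI", "CINCINNATI BENGALS"]),
  ("CLE", ["CLEVELAND", "CLEVELAND BROWNS"]),
  ("DAL", ["DALLAS", "DALLAS COWBOYS"]),
  ("DEN", ["DENVER", "DENVER BRONCOS"]),
  ("DET", ["DETROIT", "DETROIT LIONS"]),
  ("GB", ["GREEN BAY", "GREEN BAY PACKERS", "GBP"]),
  ("HOU", ["HOUSTON", "HOUSTON TEXANS"]),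
  ("IND", ["INDIANAPOLIS", "INDIANAPOLIS COLTS"]),
  ("JAX", ["JACKSONVILLE", "JACKSONVILLE JAGUARS", "JAC"]),
  ("KC", ["KANSAS CITY", "KANSAS CITY CHIEFS", "KAN"]),
  ("LV", ["LAS VEGAS", "LAS VEGAS RAIDERS", "LVR", "RAI"]),
  ("LAC", ["LOS ANGELES CHARGERS", "LAC", "SD", "SAN DIEGO"]),
  ("LAR", ["LOS ANGELES RAMS", "LA", "STL", "ST. LOUIS"]),
  ("MIA", ["MIAMI", "MIAMI DOLPHINS"]),
  ("MIN", ["MINNESOTA", "MINNESOTA VIKINGS"]),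
  ("NE", ["NEW ENGLAND", "NEW ENGLAND PATRIOTS", "NEP"]),
  ("NO", ["NEW ORLEANS", "NEW ORLEANS SAINTS", "NOR"]),
  ("NYG", ["NEW YORK GIANTS", "NYG", "NY GIANTS"]),
  ("NYJ", ["NEW YORK JETS", "NY JETS"]),
  ("PHI", ["PHILADELPHIA", "PHILADELPHIA EAGLES"]),
  ("PIT", ["PITTSBURGH", "PITTSBURGH STEELERS"]),
  ("SF", ["SAN FRANCISCO", "SAN FRANCISCO 49ERS", "SFO"]),
  ("SEA", ["SEATTLE", "SEATTLE SEAHAWKS"]),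
  ("TB", ["TAMPA BAY", "TAMPA BAY BUCCANEERS", "TAM"]),
  ("TEN", ["TENNESSEE", "TENNESSEE TITANS"]),
  ("WAS", ["WASHINGTON", "WASHINGTON COMMANDERS", "WSH"])]

-- A's `for standard, alternatives in nfl_team_mappings.items(): if … return True` loop
def nflMatchLoop (t1 t2 : String) : List (String × List String) → Bool
  | [] => false
  | (standard, alternatives) :: rest =>
      if (t1 == standard && alternatives.contains t2) ||
         (t2 == standard && alternatives.contains t1) ||
         (alternatives.contains t1 && alternatives.contains t2) then true
      else nflMatchLoop t1 t2 rest

def nfl_teams_match (team1 : String) (team2 : String) : Bool :=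
  if team1 == "" || team2 == "" then false
  else
    let t1 := PySem.Str.strip (PySem.Str.upper team1)
    let t2 := PySem.Str.strip (PySem.Str.upper team2)
    if t1 == t2 then true
    else nflMatchLoop t1 t2 nflTable

-- ===== PORT B =====
-- Source B's flat module-level literal dict CANON: alias/standard ↦ canonical abbreviation
def nflCanonList : List (String × String) := [
  ("ARI", "ARI"),
  ("ARIZONA", "ARI"),
  ("ARIZONA CARDINALS", "ARI"),
  ("ATL", "ATL"),
  ("ATLANTA", "ATL"),
  ("ATLANTA FALCONS", "ATL"),
  ("BAL", "BAL"),
  ("BALTIMORE", "BAL"),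
  ("BALTIMORE RAVENS", "BAL"),
  ("BUF", "BUF"),
  ("BUFFALO", "BUF"),
  ("BUFFALO BILLS", "BUF"),
  ("CAR", "CAR"),
  ("CAROLINA", "CAR"),
  ("CAROLINA PANTHERS", "CAR"),
  ("CHI", "CHI"),
  ("CHICAGO", "CHI"),
  ("CHICAGO BEARS", "CHI"),
  ("CIN", "CIN"),
  ("CINCINNATI", "CIN"),
  ("CINCINNATI BENGALS", "CIN"),
  ("CLE", "CLE"),
  ("CLEVELAND", "CLE"),
  ("CLEVELAND BROWNS", "CLE"),
  ("DAL", "DAL"),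
  ("DALLAS", "DAL"),
  ("DALLAS COWBOYS", "DAL"),
  ("DEN", "DEN"),
  ("DENVER", "DEN"),
  ("DENVER BRONCOS", "DEN"),
  ("DET", "DET"),
  ("DETROIT", "DET"),
  ("DETROIT LIONS", "DET"),
  ("GB", "GB"),
  ("GREEN BAY", "GB"),
  ("GREEN BAY PACKERS", "GB"),
  ("GBP", "GB"),
  ("HOU", "HOU"),
  ("HOUSTON", "HOU"),
  ("HOUSTON TEXANS", "HOU"),
  ("IND", "IND"),
  ("INDIANAPOLIS", "IND"),
  ("INDIANAPOLIS COLTS", "IND"),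
  ("JAX", "JAX"),
  ("JACKSONVILLE", "JAX"),
  ("JACKSONVILLE JAGUARS", "JAX"),
  ("JAC", "JAX"),
  ("KC", "KC"),
  ("KANSAS CITY", "KC"),
  ("KANSAS CITY CHIEFS", "KC"),
  ("KAN", "KC"),
  ("LV", "LV"),
  ("LAS VEGAS", "LV"),
  ("LAS VEGAS RAIDERS", "LV"),
  ("LVR", "LV"),
  ("RAI", "LV"),
  ("LAC", "LAC"),
  ("LOS ANGELES CHARGERS", "LAC"),
  ("SD", "LAC"),
  ("SAN DIEGO", "LAC"),
  ("LAR", "LAR"),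
  ("LOS ANGELES RAMS", "LAR"),
  ("LA", "LAR"),
  ("STL", "LAR"),
  ("ST. LOUIS", "LAR"),
  ("MIA", "MIA"),
  ("MIAMI", "MIA"),
  ("MIAMI DOLPHINS", "MIA"),
  ("MIN", "MIN"),
  ("MINNESOTA", "MIN"),
  ("MINNESOTA VIKINGS", "MIN"),
  ("NE", "NE"),
  ("NEW ENGLAND", "NE"),
  ("NEW ENGLAND PATRIOTS", "NE"),
  ("NEP", "NE"),
  ("NO", "NO"),
  ("NEW ORLEANS", "NO"),
  ("NEW ORLEANS SAINTS", "NO"),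
  ("NOR", "NO"),
  ("NYG", "NYG"),
  ("NEW YORK GIANTS", "NYG"),
  ("NY GIANTS", "NYG"),
  ("NYJ", "NYJ"),
  ("NEW YORK JETS", "NYJ"),
  ("NY JETS", "NYJ"),
  ("PHI", "PHI"),
  ("PHILADELPHIA", "PHI"),
  ("PHILADELPHIA EAGLES", "PHI"),
  ("PIT", "PIT"),
  ("PITTSBURGH", "PIT"),
  ("PITTSBURGH STEELERS", "PIT"),
  ("SF", "SF"),
  ("SAN FRANCISCO", "SF"),
  ("SAN FRANCISCO 49ERS", "SF"),
  ("SFO", "SF"),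
  ("SEA", "SEA"),
  ("SEATTLE", "SEA"),
  ("SEATTLE SEAHAWKS", "SEA"),
  ("TB", "TB"),
  ("TAMPA BAY", "TB"),
  ("TAMPA BAY BUCCANEERS", "TB"),
  ("TAM", "TB"),
  ("TEN", "TEN"),
  ("TENNESSEE", "TEN"),
  ("TENNESSEE TITANS", "TEN"),
  ("WAS", "WAS"),
  ("WASHINGTON", "WAS"),
  ("WASHINGTON COMMANDERS", "WAS"),
  ("WSH", "WAS")]

def nflCanonIndex : PySem.Dict String String := PySem.Dict.ofList nflCanonList

def nfl_teams_match_alt (team1 : String) (team2 : String) : Bool :=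
  if team1 == "" || team2 == "" then false
  else
    let t1 := PySem.Str.strip (PySem.Str.upper team1)
    let t2 := PySem.Str.strip (PySem.Str.upper team2)
    if t1 == t2 then true
    else
      let c1 := nflCanonIndex.get? t1
      let c2 := nflCanonIndex.get? t2
      c1.isSome && c1 == c2   -- Source B's `c1 is not None and c1 == c2`

-- ===== PRECONDITION & SPEC =====
def Spec_nfl_teams_match (team1 : String) (team2 : String) (out : Bool) : Prop := out = nfl_teams_match_alt team1 team2
instance (team1 : String) (team2 : String) (out : Bool) : Decidable (Spec_nfl_teams_match team1 team2 out) := by unfold Spec_nfl_teams_match; infer_instance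

-- ===== CLAIM (what is proved, stated in full; the proofs are below) =====
def Claim_equal_nfl_teams_match : Prop := ∀ (team1 : String) (team2 : String), Dom_nfl_teams_match team1 team2 → Spec_nfl_teams_match team1 team2 (nfl_teams_match team1 team2)

-- ===== LEMMAS AND PROOFS =====

-- membership of a (normalized) string in one alias group
def nflMemG (s : String) (p : String × List String) : Bool := s == p.1 || p.2.contains s

-- the alias groups have pairwise disjoint token sets
def nflDisjoint (ts : List (String × List String)) : Prop :=
  ts.Pairwise (fun p q => ∀ s ∈ p.1 :: p.2, nflMemG s q = false)

-- one group of the table, flattened to alias ↦ canonical pairs (an alternative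
-- equal to the standard is dropped: the dict already maps it)
def nflExpand (p : String × List String) : List (String × String) :=
  (p.1, p.1) :: (p.2.filter (fun a => a != p.1)).map (fun a => (a, p.1))

lemma contains_filter_ne {l : List String} {s t : String} (h : ¬ t = s) :
    (l.filter (fun a => a != t)).contains s = l.contains s := by
  by_cases hm : s ∈ l
  · have h2 : s ∈ l.filter (fun a => a != t) :=
      List.mem_filter.mpr ⟨hm, by simp; exact fun e => h e.symm⟩
    simp [List.contains_iff_mem, hm, h2]
  · have h2 : s ∉ l.filter (fun a => a != t) := fun hc => hm (List.mem_filter.mp hc).1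
    simp [List.contains_iff_mem, hm, h2]

lemma nflMemG_mem_tokens {s : String} {p : String × List String} (h : nflMemG s p = true) :
    s ∈ p.1 :: p.2 := by
  simp [nflMemG] at h
  rcases h with h | h
  · simp [h]
  · simp [h]

lemma get?_mk_map_append (v : String) (l1 : List String) (l : List (String × String)) (s : String) :
    (PySem.Dict.mk (l1.map (fun a => (a, v)) ++ l)).get? s =
      if l1.contains s then some v else (PySem.Dict.mk l).get? s := by
  induction l1 with
  | nil => simp
  | cons a l1 ih =>
    simp only [List.map_cons, List.cons_append, PySem.Dict.get?_mk_cons, ih, List.contains_cons]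
    by_cases h : a = s
    · simp [h]
    · have : (a == s) = false := by simpa using h
      have hs : (s == a) = false := by simpa using (Ne.symm h)
      simp [this, hs]

lemma get?_mk_expand_append (p : String × List String) (l : List (String × String)) (s : String) :
    (PySem.Dict.mk (nflExpand p ++ l)).get? s =
      if nflMemG s p then some p.1 else (PySem.Dict.mk l).get? s := by
  simp only [nflExpand, List.cons_append, PySem.Dict.get?_mk_cons, get?_mk_map_append, nflMemG]
  by_cases h1 : p.1 = s
  · simp [h1]
  · have h1' : (p.1 == s) = false := by simpa using h1
    have h1s : (s == p.1) = false := by simpa using (Ne.symm h1)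
    rw [contains_filter_ne h1]
    by_cases h2 : p.2.contains s = true <;> simp [h1', h1s, h2]

lemma get?_mk_flatMap (ts : List (String × List String)) (hd : nflDisjoint ts) (s : String) :
    (PySem.Dict.mk (ts.flatMap nflExpand)).get? s = (ts.find? (nflMemG s)).map (·.1) := by
  induction ts with
  | nil => simp [PySem.Dict.get?]
  | cons p r ih =>
    rcases List.pairwise_cons.mp hd with ⟨_, hr⟩
    simp only [List.flatMap_cons, get?_mk_expand_append]
    by_cases hm : nflMemG s p = true
    · rw [if_pos hm, List.find?_cons_of_pos hm]; simp
    · rw [if_neg (by simpa using hm), List.find?_cons_of_neg hm, ih hr]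

lemma nflTable_disjoint : nflDisjoint nflTable := by unfold nflDisjoint; decide

-- the flat literal dict is exactly the flattened table (checked value-by-value)
set_option maxRecDepth 4000 in
lemma canonIndex_eq : nflCanonIndex = PySem.Dict.mk (nflTable.flatMap nflExpand) := by decide

lemma canonIndex_get? (s : String) :
    nflCanonIndex.get? s = (nflTable.find? (nflMemG s)).map (·.1) := by
  rw [canonIndex_eq, get?_mk_flatMap nflTable nflTable_disjoint]

-- a token found in one group is in no other group
lemma find?_ne_of_mem {s : String} {p : String × List String} {r : List (String × List String)}
    (hp : ∀ q' ∈ r, ∀ t ∈ p.1 :: p.2, nflMemG t q' = false)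
    (hm : nflMemG s p = true) : r.find? (nflMemG s) = none := by
  apply List.find?_eq_none.mpr
  intro q' hq'
  simp [hp q' hq' s (nflMemG_mem_tokens hm)]

lemma nflMatchLoop_eq (ts : List (String × List String)) (hd : nflDisjoint ts)
    (t1 t2 : String) (hne : (t1 == t2) = false) :
    nflMatchLoop t1 t2 ts =
      match ts.find? (nflMemG t1), ts.find? (nflMemG t2) with
      | some p, some q => p.1 == q.1
      | _, _ => false := by
  induction ts with
  | nil => rfl
  | cons p r ih =>
    rcases List.pairwise_cons.mp hd with ⟨hp, hr⟩
    obtain ⟨std, alts⟩ := p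
    by_cases h1 : nflMemG t1 (std, alts) = true <;>
    by_cases h2 : nflMemG t2 (std, alts) = true
    · have hcond : ((t1 == std && alts.contains t2) ||
          (t2 == std && alts.contains t1) ||
          (alts.contains t1 && alts.contains t2)) = true := by
        simp only [nflMemG] at h1 h2
        rcases Bool.or_eq_true_iff.mp h1 with ha | ha <;>
        rcases Bool.or_eq_true_iff.mp h2 with hb | hb
        · exfalso; rw [eq_of_beq ha, eq_of_beq hb] at hne; simp at hne
        · simp_all
        · simp_all
        · simp_all
      have hL : nflMatchLoop t1 t2 ((std, alts) :: r) = true := by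
        simp only [nflMatchLoop]; rw [if_pos hcond]
      rw [hL, List.find?_cons_of_pos h1, List.find?_cons_of_pos h2]
      simp
    · have hcf : ((t1 == std && alts.contains t2) ||
          (t2 == std && alts.contains t1) ||
          (alts.contains t1 && alts.contains t2)) = false := by
        have h2' := h2
        simp [nflMemG] at h2'
        simp [h2'.1, h2'.2]
      have hnone1 : r.find? (nflMemG t1) = none := find?_ne_of_mem hp h1
      have hL : nflMatchLoop t1 t2 ((std, alts) :: r) = nflMatchLoop t1 t2 r := by
        simp only [nflMatchLoop]; rw [hcf]; simp
      rw [hL, List.find?_cons_of_pos h1, List.find?_cons_of_neg h2, ih hr, hnone1]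
      cases hf2 : r.find? (nflMemG t2) with
      | none => rfl
      | some q =>
        have hq : q ∈ r := List.mem_of_find?_eq_some hf2
        have hmq : nflMemG t2 q = true := List.find?_some hf2
        have : nflMemG std q = false := hp q hq std (by simp)
        have hq1 : nflMemG q.1 q = true := by simp [nflMemG]
        have hne' : (std == q.1) = false := by
          by_contra hcon
          have : std = q.1 := eq_of_beq (by simpa using hcon)
          rw [this] at *
          simp_all
        simp [hne']
    · have hcf : ((t1 == std && alts.contains t2) ||
          (t2 == std && alts.contains t1) ||
          (alts.contains t1 && alts.contains t2)) = false := by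
        have h1' := h1
        simp [nflMemG] at h1'
        simp [h1'.1, h1'.2]
      have hnone2 : r.find? (nflMemG t2) = none := find?_ne_of_mem hp h2
      have hL : nflMatchLoop t1 t2 ((std, alts) :: r) = nflMatchLoop t1 t2 r := by
        simp only [nflMatchLoop]; rw [hcf]; simp
      rw [hL, List.find?_cons_of_neg h1, List.find?_cons_of_pos h2, ih hr, hnone2]
      cases hf1 : r.find? (nflMemG t1) with
      | none => rfl
      | some q =>
        have hq : q ∈ r := List.mem_of_find?_eq_some hf1
        have : nflMemG std q = false := hp q hq std (by simp)
        have hq1 : nflMemG q.1 q = true := by simp [nflMemG]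
        have hne' : (q.1 == std) = false := by
          by_contra hcon
          have : q.1 = std := eq_of_beq (by simpa using hcon)
          rw [this] at hq1
          simp_all
        simp [hne']
    · have hcf : ((t1 == std && alts.contains t2) ||
          (t2 == std && alts.contains t1) ||
          (alts.contains t1 && alts.contains t2)) = false := by
        have h1' := h1
        simp [nflMemG] at h1'
        simp [h1'.1, h1'.2]
      have hL : nflMatchLoop t1 t2 ((std, alts) :: r) = nflMatchLoop t1 t2 r := by
        simp only [nflMatchLoop]; rw [hcf]; simp
      rw [hL, List.find?_cons_of_neg h1, List.find?_cons_of_neg h2]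
      exact ih hr

-- ===== VERDICT (by name: the statement is the Claim_ definition above) =====
theorem nfl_teams_match_spec : Claim_equal_nfl_teams_match := by
  intro team1 team2 _
  unfold Spec_nfl_teams_match nfl_teams_match nfl_teams_match_alt
  by_cases hg : (team1 == "" || team2 == "") = true
  · simp [hg]
  · simp only [hg, Bool.false_eq_true, if_false]
    set t1 := PySem.Str.strip (PySem.Str.upper team1) with ht1
    set t2 := PySem.Str.strip (PySem.Str.upper team2) with ht2
    by_cases heq : (t1 == t2) = true
    · simp [heq]
    · simp only [heq, Bool.false_eq_true, if_false]
      rw [nflMatchLoop_eq nflTable nflTable_disjoint t1 t2 (by simpa using heq),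
          canonIndex_get?, canonIndex_get?]
      cases nflTable.find? (nflMemG t1) <;> cases nflTable.find? (nflMemG t2) <;> simp
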